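-- pv_equiv track=rewrite | github.com/PawanKrGunjan/DSA-and-AI-Algorithm | Python Problems/Find all distinct subset (or subsequence) sums/All distinct subset (or subsequence) sums.py | DistinctSum
-- ===== SOURCE A (Python) =====
-- def DistinctSum(nums):
-- 	# Code here
-- 	nums.sort()
-- 	l = len(nums)
-- 	n = l
-- 	S = set()
-- 	#while n > 1:
-- 	for i in range(l):
-- 		S.add(nums[i])
-- 		S.add(sum(nums[:i+1]))
-- 		S.add(sum(nums[i:]))
-- 		for j in range(i+1,l):
-- 			S.add(sum(nums[i:j]))
-- 	return S
-- ===== SOURCE B (Python) =====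
-- def DistinctSum(nums):
--     # Same distinct sums; prefix sums make every subarray sum an O(1) difference.
--     # Like A, sorts nums in place (observable mutation).
--     nums.sort()
--     l = len(nums)
--     P = [0]
--     s = 0
--     for x in nums:
--         s += x
--         P.append(s)
--     S = set()
--     for i in range(l):
--         S.add(P[i + 1] - P[i])
--         S.add(P[i + 1])
--         S.add(P[l] - P[i])
--         for j in range(i + 1, l):
--             S.add(P[j] - P[i])
--     return S
-- ===== Notes on version B (the rewrite author's own statement) =====
-- stated objective: faster
-- what changed: B precomputes the prefix-sum array of the sorted list in one pass and reads every element, prefix, suffix and subarray sum as an O(1) difference P[j]-P[i], removing A's O(n) slice-and-sum inside the double loop.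
import Mathlib
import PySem

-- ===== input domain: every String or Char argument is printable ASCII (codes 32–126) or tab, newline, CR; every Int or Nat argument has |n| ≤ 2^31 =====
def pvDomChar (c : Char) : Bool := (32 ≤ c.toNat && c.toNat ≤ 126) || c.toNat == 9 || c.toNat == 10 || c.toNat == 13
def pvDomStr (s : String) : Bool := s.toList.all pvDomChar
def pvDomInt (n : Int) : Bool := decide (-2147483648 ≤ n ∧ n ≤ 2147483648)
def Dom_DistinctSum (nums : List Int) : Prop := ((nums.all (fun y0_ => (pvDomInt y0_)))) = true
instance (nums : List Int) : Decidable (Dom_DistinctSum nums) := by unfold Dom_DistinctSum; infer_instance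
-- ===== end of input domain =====

-- B replaces A's repeated O(n) slice sums with one prefix-sum pass, reading every
-- subarray sum as a difference P[j]-P[i]; like A, B sorts its argument in place.


-- ===== PORT A =====
def DistinctSum (nums : List Int) : List Int :=
  let ns := PySem.List.sorted nums (fun x => x) false
  let l : Int := ns.length
  (PySem.List.pyRange 0 l 1).foldl (fun S i =>
    let S := PySem.Set.add S (PySem.List.pyGetD ns i 0)
    let S := PySem.Set.add S (PySem.List.slice ns none (some (i + 1))).sum
    let S := PySem.Set.add S (PySem.List.slice ns (some i) none).sum
    (PySem.List.pyRange (i + 1) l 1).foldl (fun S j =>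
      PySem.Set.add S (PySem.List.slice ns (some i) (some j)).sum) S)
    PySem.Set.empty

-- ===== PORT B =====
def DistinctSum_alt (nums : List Int) : List Int :=
  let ns := PySem.List.sorted nums (fun x => x) false
  let l : Int := ns.length
  let sP := ns.foldl (fun (sP : Int × List Int) x =>
    (sP.1 + x, sP.2 ++ [sP.1 + x])) (0, [0])
  let P := sP.2
  (PySem.List.pyRange 0 l 1).foldl (fun S i =>
    let S := PySem.Set.add S (PySem.List.pyGetD P (i + 1) 0 - PySem.List.pyGetD P i 0)
    let S := PySem.Set.add S (PySem.List.pyGetD P (i + 1) 0)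
    let S := PySem.Set.add S (PySem.List.pyGetD P l 0 - PySem.List.pyGetD P i 0)
    (PySem.List.pyRange (i + 1) l 1).foldl (fun S j =>
      PySem.Set.add S (PySem.List.pyGetD P j 0 - PySem.List.pyGetD P i 0)) S)
    PySem.Set.empty

-- ===== PRECONDITION & SPEC =====
def Spec_DistinctSum (nums : List Int) (out : List Int) : Prop := out = DistinctSum_alt nums
instance (nums : List Int) (out : List Int) : Decidable (Spec_DistinctSum nums out) := by unfold Spec_DistinctSum; infer_instance

-- ===== CLAIM (what is proved, stated in full; the proofs are below) =====
def Claim_equal_DistinctSum : Prop := ∀ (nums : List Int), Dom_DistinctSum nums → Spec_DistinctSum nums (DistinctSum nums)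

-- ===== LEMMAS AND PROOFS =====

-- B's prefix-sum list: entry k is the sum of the first k elements of ns.
def pvPref (ns : List Int) : List Int :=
  (List.range (ns.length + 1)).map (fun k => (ns.take k).sum)

theorem pv_fold_pref (ns : List Int) : ∀ (s0 : Int) (P0 : List Int),
    ns.foldl (fun (sP : Int × List Int) x => (sP.1 + x, sP.2 ++ [sP.1 + x])) (s0, P0)
    = (s0 + ns.sum, P0 ++ (List.range ns.length).map (fun k => s0 + (ns.take (k + 1)).sum)) := by
  induction ns with
  | nil => intro s0 P0; simp
  | cons x xs ih =>
    intro s0 P0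
    simp only [List.foldl_cons]
    rw [ih]
    simp [List.range_succ_eq_map, List.map_map, Function.comp, add_assoc]

theorem pv_pref_eq (ns : List Int) :
    (ns.foldl (fun (sP : Int × List Int) x => (sP.1 + x, sP.2 ++ [sP.1 + x])) (0, [0])).2
    = pvPref ns := by
  rw [pv_fold_pref]
  simp [pvPref, List.range_succ_eq_map, List.map_map, Function.comp]

theorem pv_pref_get (ns : List Int) (j : Int) (h0 : 0 ≤ j) (h1 : j ≤ (ns.length : Int)) :
    PySem.List.pyGetD (pvPref ns) j 0 = (ns.take j.toNat).sum := by
  have hlen : (pvPref ns).length = ns.length + 1 := by simp [pvPref]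
  rw [PySem.List.pyGetD_eq_getElem _ _ h0 (by rw [hlen]; push_cast; omega)]
  simp [pvPref]

theorem pv_slice_sum (ns : List Int) (i j : Int) (h0 : 0 ≤ i) (hij : i ≤ j) :
    (PySem.List.slice ns (some i) (some j)).sum
    = (ns.take j.toNat).sum - (ns.take i.toNat).sum := by
  rw [PySem.List.slice_toNat ns h0 (by omega), ← List.drop_take]
  have h2 := List.sum_take_add_sum_drop (List.take j.toNat ns) i.toNat
  rw [List.take_take, min_eq_left (Int.toNat_le_toNat hij)] at h2
  omega

theorem pv_elem (ns : List Int) (i : Int) (h0 : 0 ≤ i) (h1 : i < (ns.length : Int)) :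
    PySem.List.pyGetD ns i 0
    = PySem.List.pyGetD (pvPref ns) (i + 1) 0 - PySem.List.pyGetD (pvPref ns) i 0 := by
  rw [pv_pref_get ns (i + 1) (by omega) (by omega), pv_pref_get ns i h0 (by omega),
    PySem.List.pyGetD_eq_getElem ns 0 h0 h1]
  rw [show (i + 1).toNat = i.toNat + 1 by omega, List.sum_take_succ ns i.toNat (by omega)]
  ring

theorem pv_prefix (ns : List Int) (i : Int) (h0 : 0 ≤ i) (h1 : i < (ns.length : Int)) :
    (PySem.List.slice ns none (some (i + 1))).sum
    = PySem.List.pyGetD (pvPref ns) (i + 1) 0 := by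
  rw [PySem.List.slice_to ns (by omega), pv_pref_get ns (i + 1) (by omega) (by omega)]

theorem pv_suffix (ns : List Int) (i : Int) (h0 : 0 ≤ i) (h1 : i ≤ (ns.length : Int)) :
    (PySem.List.slice ns (some i) none).sum
    = PySem.List.pyGetD (pvPref ns) (ns.length : Int) 0 - PySem.List.pyGetD (pvPref ns) i 0 := by
  rw [PySem.List.slice_from ns h0, pv_pref_get ns _ (by omega) (le_refl _),
    pv_pref_get ns i h0 h1]
  rw [show ((ns.length : Int)).toNat = ns.length by omega, List.take_length]
  have h2 := List.sum_take_add_sum_drop ns i.toNat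
  omega

theorem pv_inner (ns : List Int) (i j : Int) (h0 : 0 ≤ i) (hij : i ≤ j)
    (hj : j ≤ (ns.length : Int)) :
    (PySem.List.slice ns (some i) (some j)).sum
    = PySem.List.pyGetD (pvPref ns) j 0 - PySem.List.pyGetD (pvPref ns) i 0 := by
  rw [pv_slice_sum ns i j h0 hij, pv_pref_get ns j (by omega) hj, pv_pref_get ns i h0 (by omega)]

theorem pv_main (ns : List Int) :
    (PySem.List.pyRange 0 (ns.length : Int) 1).foldl (fun S i =>
      (PySem.List.pyRange (i + 1) (ns.length : Int) 1).foldl (fun S j =>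
        PySem.Set.add S (PySem.List.slice ns (some i) (some j)).sum)
        (PySem.Set.add (PySem.Set.add (PySem.Set.add S (PySem.List.pyGetD ns i 0))
          (PySem.List.slice ns none (some (i + 1))).sum)
          (PySem.List.slice ns (some i) none).sum))
      PySem.Set.empty
    = (PySem.List.pyRange 0 (ns.length : Int) 1).foldl (fun S i =>
      (PySem.List.pyRange (i + 1) (ns.length : Int) 1).foldl (fun S j =>
        PySem.Set.add S (PySem.List.pyGetD (pvPref ns) j 0 - PySem.List.pyGetD (pvPref ns) i 0))
        (PySem.Set.add (PySem.Set.add (PySem.Set.add S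
          (PySem.List.pyGetD (pvPref ns) (i + 1) 0 - PySem.List.pyGetD (pvPref ns) i 0))
          (PySem.List.pyGetD (pvPref ns) (i + 1) 0))
          (PySem.List.pyGetD (pvPref ns) ((ns.length : Int)) 0 - PySem.List.pyGetD (pvPref ns) i 0)))
      PySem.Set.empty := by
  apply PySem.List.foldl_congr_mem
  intro S i hi
  rw [PySem.List.mem_pyRange_one] at hi
  obtain ⟨h0, h1⟩ := hi
  rw [pv_elem ns i h0 h1, pv_prefix ns i h0 h1, pv_suffix ns i h0 (le_of_lt h1)]
  apply PySem.List.foldl_congr_mem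
  intro S' j hj
  rw [PySem.List.mem_pyRange_one] at hj
  rw [pv_inner ns i j h0 (by omega) (by omega)]

-- ===== VERDICT (by name: the statement is the Claim_ definition above) =====
theorem DistinctSum_spec : Claim_equal_DistinctSum := by
  intro nums _
  show DistinctSum nums = DistinctSum_alt nums
  unfold DistinctSum DistinctSum_alt
  simp only [pv_pref_eq]
  exact pv_main (PySem.List.sorted nums (fun x => x) false)
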